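-- pv_equiv track=rewrite | github.com/VictorMuhu/pm-experiment-studio | weekly-builds/2026-w01-product-brief-input-normalizer/code/normalize_inputs.py | normalize_experiments
-- ===== SOURCE A (Python) =====
-- def normalize_experiments(raw):
--     """
--     Normalize experiment note entries.
--     Required fields: experiment_name, hypothesis, result, interpretation
--     """
--     normalized = []
--     for entry in raw:
--         normalized.append({
--             "experiment_name": entry.get("experiment_name", ""),
--             "hypothesis": entry.get("hypothesis", ""),
--             "result": entry.get("result", ""),
--             "interpretation": entry.get("interpretation", ""),
--         })
--     return normalized
-- ===== SOURCE B (Python) =====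
-- FIELDS = ("experiment_name", "hypothesis", "result", "interpretation")
--
--
-- def _normalize_one(entry):
--     # Start from a defaults template and scatter the entry's own items into it,
--     # instead of probing the entry once per required field.
--     d = dict.fromkeys(FIELDS, "")
--     for k, v in entry.items():
--         if k in d:
--             d[k] = v
--     return d
--
--
-- def normalize_experiments(raw):
--     return list(map(_normalize_one, raw))
-- ===== Notes on version B (the rewrite author's own statement) =====
-- stated objective: alternative
-- what changed: B inverts the traversal: instead of probing each entry with four hardcoded per-field .get lookups, it builds a defaults template with dict.fromkeys and makes one pass over the entry's own items, scattering the keys that belong to the schema into the template.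
import Mathlib
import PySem

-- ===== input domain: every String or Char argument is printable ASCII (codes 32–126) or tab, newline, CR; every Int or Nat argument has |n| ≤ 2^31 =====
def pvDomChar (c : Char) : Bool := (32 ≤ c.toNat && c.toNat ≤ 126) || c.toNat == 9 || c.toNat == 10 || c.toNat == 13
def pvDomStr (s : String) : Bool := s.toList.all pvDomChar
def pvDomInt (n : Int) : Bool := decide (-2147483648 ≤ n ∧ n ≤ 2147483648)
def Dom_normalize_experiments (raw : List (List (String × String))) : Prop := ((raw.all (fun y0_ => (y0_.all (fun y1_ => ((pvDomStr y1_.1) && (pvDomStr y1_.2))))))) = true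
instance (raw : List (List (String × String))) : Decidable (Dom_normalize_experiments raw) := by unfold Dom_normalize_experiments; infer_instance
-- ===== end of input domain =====

-- B inverts the traversal: instead of probing each entry with four per-field .get lookups,
-- it scatters the entry's own items into a dict.fromkeys defaults template (alternative; same cost).
-- Equivalence is about the return value only; neither program mutates its argument.

-- ===== PORT A =====
-- entry.get(k, "") on a dict given as an association list
def pvGetEntry (entry : List (String × String)) (k : String) : String :=
  (PySem.Dict.mk entry).getD k ""

def normalize_experiments (raw : List (List (String × String))) : List (List (String × String)) :=
  raw.foldl (fun normalized entry =>
    normalized ++ [[("experiment_name", pvGetEntry entry "experiment_name"),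
                    ("hypothesis", pvGetEntry entry "hypothesis"),
                    ("result", pvGetEntry entry "result"),
                    ("interpretation", pvGetEntry entry "interpretation")]]) []

-- ===== PORT B =====
def FIELDS : List String := ["experiment_name", "hypothesis", "result", "interpretation"]

-- dict.fromkeys(FIELDS, "")
def pvTemplate : PySem.Dict String String :=
  FIELDS.foldl (fun d f => d.insert f "") PySem.Dict.empty

def pvNormalizeOne (entry : List (String × String)) : List (String × String) :=
  (entry.foldl (fun d kv => if d.contains kv.1 then d.insert kv.1 kv.2 else d) pvTemplate).items

def normalize_experiments_alt (raw : List (List (String × String))) : List (List (String × String)) :=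
  raw.map pvNormalizeOne

-- ===== PRECONDITION & SPEC =====
-- Pre_ requires each entry's key list to be duplicate-free — guaranteed for any input coming
-- from Python, where each entry is a dict; it excludes no input the Python A accepts.
def Pre_normalize_experiments (raw : List (List (String × String))) : Prop :=
  ∀ entry ∈ raw, (entry.map Prod.fst).Nodup
instance (raw : List (List (String × String))) : Decidable (Pre_normalize_experiments raw) := by
  unfold Pre_normalize_experiments; infer_instance

def pvWitness_normalize_experiments : (List (List (String × String))) :=
  [[("experiment_name", "vitamin C trial"), ("result", "null")], []]

def Spec_normalize_experiments (raw : List (List (String × String))) (out : List (List (String × String))) : Prop := out = normalize_experiments_alt raw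
instance (raw : List (List (String × String))) (out : List (List (String × String))) : Decidable (Spec_normalize_experiments raw out) := by unfold Spec_normalize_experiments; infer_instance

-- ===== CLAIM (what is proved, stated in full; the proofs are below) =====
def Claim_equal_normalize_experiments : Prop := ∀ (raw : List (List (String × String))), Dom_normalize_experiments raw → Pre_normalize_experiments raw → Spec_normalize_experiments raw (normalize_experiments raw)

-- ===== LEMMAS AND PROOFS =====
-- one step of B's inner scatter loop
def pvStep (d : PySem.Dict String String) (kv : String × String) : PySem.Dict String String :=
  if d.contains kv.1 then d.insert kv.1 kv.2 else d

theorem keys_pvStep (d : PySem.Dict String String) (kv : String × String) :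
    (pvStep d kv).keys = d.keys := by
  unfold pvStep
  split
  · exact PySem.Dict.keys_insert_of_contains d kv.2 (by assumption)
  · rfl

theorem keys_foldl_pvStep (entry : List (String × String)) (d : PySem.Dict String String) :
    (entry.foldl pvStep d).keys = d.keys := by
  induction entry generalizing d with
  | nil => rfl
  | cons kv rest ih => simp [List.foldl, ih, keys_pvStep]

theorem nodup_keys_foldl_pvStep (entry : List (String × String)) (d : PySem.Dict String String)
    (h : d.keys.Nodup) : (entry.foldl pvStep d).keys.Nodup := by
  rw [keys_foldl_pvStep]; exact h

-- the scatter loop ends, for every key present in d, at the first-match value of a nodup entry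
theorem getD_foldl_pvStep (entry : List (String × String)) (d : PySem.Dict String String)
    (f : String) (dflt : String)
    (hnd : (entry.map Prod.fst).Nodup) (hc : d.contains f = true) :
    (entry.foldl pvStep d).getD f dflt = (PySem.Dict.mk entry).getD f (d.getD f dflt) := by
  induction entry generalizing d with
  | nil =>
    have h0 : (PySem.Dict.mk ([] : List (String × String))).get? f = none := by
      rw [PySem.Dict.get?_eq_none_iff_not_mem_keys]; simp
    simp [List.foldl, PySem.Dict.getD_eq_get?_getD, h0]
  | cons kv rest ih =>
    obtain ⟨k, v⟩ := kv
    simp only [List.map_cons, List.nodup_cons] at hnd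
    obtain ⟨hk, hrest⟩ := hnd
    have hgetD : (PySem.Dict.mk ((k, v) :: rest)).getD f (d.getD f dflt)
        = if k = f then v else (PySem.Dict.mk rest).getD f (d.getD f dflt) := by
      rw [PySem.Dict.getD_eq_get?_getD, PySem.Dict.get?_mk_cons]
      by_cases h : k = f
      · simp [h]
      · simp [h, PySem.Dict.getD_eq_get?_getD]
    simp only [List.foldl_cons, pvStep]
    by_cases hdk : d.contains k = true
    · rw [if_pos hdk]
      have hc' : (d.insert k v).contains f = true := by
        rw [PySem.Dict.contains_insert, hc]; simp
      rw [ih (d.insert k v) hrest hc', hgetD]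
      by_cases hfk : k = f
      · subst hfk
        have hnone : (PySem.Dict.mk rest).get? k = none := by
          rw [PySem.Dict.get?_eq_none_iff_not_mem_keys]; simpa using hk
        rw [PySem.Dict.getD_eq_get?_getD, hnone, if_pos rfl]
        simp [PySem.Dict.getD_insert_self]
      · rw [if_neg hfk, PySem.Dict.getD_insert_of_ne d v dflt (Ne.symm hfk)]
    · rw [if_neg hdk, ih d hrest hc, hgetD]
      have hfk : k ≠ f := by rintro rfl; exact hdk hc
      rw [if_neg hfk]

theorem pvTemplate_keys : pvTemplate.keys = FIELDS := by decide

theorem pvTemplate_contains (f : String) (hf : f ∈ FIELDS) : pvTemplate.contains f = true := by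
  rw [PySem.Dict.contains_iff_mem_keys, pvTemplate_keys]; exact hf

theorem pvTemplate_getD (f : String) (hf : f ∈ FIELDS) : pvTemplate.getD f "" = "" := by
  fin_cases hf <;> decide

theorem pvNormalizeOne_eq (entry : List (String × String))
    (hnd : (entry.map Prod.fst).Nodup) :
    pvNormalizeOne entry = FIELDS.map (fun f => (f, pvGetEntry entry f)) := by
  unfold pvNormalizeOne
  have hfold : (fun d kv => if (PySem.Dict.contains d kv.1) then d.insert kv.1 kv.2 else d)
      = pvStep := by rfl
  rw [hfold]
  rw [PySem.Dict.items_eq_map_keys _ (nodup_keys_foldl_pvStep entry pvTemplate (by decide)) ""]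
  rw [keys_foldl_pvStep, pvTemplate_keys]
  apply List.map_congr_left
  intro f hf
  rw [getD_foldl_pvStep entry pvTemplate f "" hnd (pvTemplate_contains f hf),
      pvTemplate_getD f hf]
  rfl

theorem normalize_foldl (raw : List (List (String × String))) (acc : List (List (String × String))) :
    raw.foldl (fun normalized entry =>
      normalized ++ [[("experiment_name", pvGetEntry entry "experiment_name"),
                      ("hypothesis", pvGetEntry entry "hypothesis"),
                      ("result", pvGetEntry entry "result"),
                      ("interpretation", pvGetEntry entry "interpretation")]]) acc
      = acc ++ raw.map (fun entry => FIELDS.map (fun f => (f, pvGetEntry entry f))) := by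
  induction raw generalizing acc with
  | nil => simp
  | cons e t ih => simp [List.foldl, ih, FIELDS]

-- ===== VERDICT (by name: the statement is the Claim_ definition above) =====
theorem normalize_experiments_spec : Claim_equal_normalize_experiments := by
  intro raw _ hpre
  unfold Spec_normalize_experiments normalize_experiments normalize_experiments_alt
  rw [normalize_foldl raw []]
  simp only [List.nil_append]
  exact (List.map_congr_left (fun e he => (pvNormalizeOne_eq e (hpre e he)).symm))
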